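-- pv_equiv track=rewrite | github.com/f4rceful/BookRAG | backend/services/book_parser.py | get_chunk_structure
-- ===== SOURCE A (Python) =====
-- def get_chunk_structure(markers: list, chunk_start: int) -> dict:
--     # Определяет структуру (Том/Часть/Глава/Эпилог) для фрагмента по его позиции в тексте
--     tome = part = chapter = epilogue = ""
--     for pos, mtype, value in markers:
--         if pos > chunk_start:
--             break
--         if mtype == 'tome':
--             tome, part, chapter, epilogue = value, "", "", ""
--         elif mtype == 'part':
--             part, chapter, epilogue = value, "", ""
--         elif mtype == 'chapter':
--             chapter, epilogue = value, ""
--         else: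
--             chapter = ""
--             epilogue = value
--     return {
--         k: v
--         for k, v in [('tome', tome), ('part', part), ('chapter', chapter), ('epilogue', epilogue)]
--         if v
--     }
-- ===== SOURCE B (Python) =====
-- def get_chunk_structure(markers: list, chunk_start: int) -> dict:
--     # Reverse scan of the relevant prefix: cut at the first marker past chunk_start,
--     # then walk backwards, taking the first (i.e. latest) marker of each kind that
--     # is still in force, stopping at the first 'tome'.
--     n = 0
--     while n < len(markers) and markers[n][0] <= chunk_start:
--         n += 1
--     tome = part = chapter = epilogue = ""
--     seen_part = seen_ce = False
--     for _pos, mtype, value in reversed(markers[:n]):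
--         if mtype == 'tome':
--             tome = value
--             break
--         if mtype == 'part':
--             if not seen_part:
--                 part = value
--                 seen_part = True
--         elif mtype == 'chapter':
--             if not seen_part and not seen_ce:
--                 chapter = value
--             seen_ce = True
--         else:
--             if not seen_part and not seen_ce:
--                 epilogue = value
--             seen_ce = True
--     return {
--         k: v
--         for k, v in [('tome', tome), ('part', part), ('chapter', chapter), ('epilogue', epilogue)]
--         if v
--     }
-- ===== Notes on version B (the rewrite author's own statement) =====
-- stated objective: alternative
-- what changed: Instead of A's forward state machine that repeatedly overwrites and resets fields, B cuts the marker list at the first position past chunk_start and scans that prefix backwards, taking the first still-in-force marker of each kind and stopping at the first 'tome'.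
import Mathlib
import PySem

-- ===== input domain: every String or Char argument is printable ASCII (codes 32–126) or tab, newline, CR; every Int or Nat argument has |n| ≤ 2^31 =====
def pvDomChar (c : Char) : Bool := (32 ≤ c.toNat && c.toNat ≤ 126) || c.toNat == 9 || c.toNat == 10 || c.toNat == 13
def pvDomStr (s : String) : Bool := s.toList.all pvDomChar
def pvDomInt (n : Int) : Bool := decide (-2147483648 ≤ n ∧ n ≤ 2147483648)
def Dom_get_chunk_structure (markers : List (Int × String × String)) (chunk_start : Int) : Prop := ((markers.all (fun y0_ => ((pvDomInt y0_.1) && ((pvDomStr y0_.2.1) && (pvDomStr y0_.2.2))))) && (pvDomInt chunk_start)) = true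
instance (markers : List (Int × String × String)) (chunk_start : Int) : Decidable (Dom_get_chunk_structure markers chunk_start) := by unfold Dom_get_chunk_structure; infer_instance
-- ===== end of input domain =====

-- B replaces A's forward overwrite-and-reset state machine by a backward scan of the
-- relevant prefix that stops at the first 'tome' (objective: alternative, same cost).

-- ===== PORT A =====
-- loop body of A (the if/elif chain, state = (tome, part, chapter, epilogue))
def pvStepA (s : String × String × String × String) (x : Int × String × String) :
    String × String × String × String :=
  if x.2.1 == "tome" then (x.2.2, "", "", "")
  else if x.2.1 == "part" then (s.1, x.2.2, "", "")
  else if x.2.1 == "chapter" then (s.1, s.2.1, x.2.2, "")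
  else (s.1, s.2.1, "", x.2.2)

-- A's for-loop with its break
def pvGoA (cs : Int) : List (Int × String × String) → (String × String × String × String) →
    String × String × String × String
  | [], s => s
  | x :: rest, s => if x.1 > cs then s else pvGoA cs rest (pvStepA s x)

def get_chunk_structure (markers : List (Int × String × String)) (chunk_start : Int) : List (String × String) :=
  let r := pvGoA chunk_start markers ("", "", "", "")
  ([("tome", r.1), ("part", r.2.1), ("chapter", r.2.2.1), ("epilogue", r.2.2.2)]).filter
    (fun kv => kv.2 != "")

-- ===== PORT B =====
-- B's while loop: number of leading markers with pos <= chunk_start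
def pvCut (cs : Int) : List (Int × String × String) → Nat
  | [] => 0
  | x :: rest => if x.1 ≤ cs then pvCut cs rest + 1 else 0

-- B's backward for-loop; sp = seen_part, sce = seen_chap_epi; 'tome' breaks
def pvGoB : List (Int × String × String) → (String × String × String × String) → Bool → Bool →
    String × String × String × String
  | [], s, _, _ => s
  | x :: rest, s, sp, sce =>
    if x.2.1 == "tome" then (x.2.2, s.2.1, s.2.2.1, s.2.2.2)
    else if x.2.1 == "part" then
      pvGoB rest (s.1, if sp then s.2.1 else x.2.2, s.2.2.1, s.2.2.2) true sce
    else if x.2.1 == "chapter" then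
      pvGoB rest (s.1, s.2.1, if !sp && !sce then x.2.2 else s.2.2.1, s.2.2.2) sp true
    else
      pvGoB rest (s.1, s.2.1, s.2.2.1, if !sp && !sce then x.2.2 else s.2.2.2) sp true

def get_chunk_structure_alt (markers : List (Int × String × String)) (chunk_start : Int) : List (String × String) :=
  let r := pvGoB ((markers.take (pvCut chunk_start markers)).reverse) ("", "", "", "") false false
  ([("tome", r.1), ("part", r.2.1), ("chapter", r.2.2.1), ("epilogue", r.2.2.2)]).filter
    (fun kv => kv.2 != "")

-- ===== PRECONDITION & SPEC =====
def Spec_get_chunk_structure (markers : List (Int × String × String)) (chunk_start : Int) (out : List (String × String)) : Prop := out = get_chunk_structure_alt markers chunk_start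
instance (markers : List (Int × String × String)) (chunk_start : Int) (out : List (String × String)) : Decidable (Spec_get_chunk_structure markers chunk_start out) := by unfold Spec_get_chunk_structure; infer_instance

-- ===== CLAIM (what is proved, stated in full; the proofs are below) =====
def Claim_equal_get_chunk_structure : Prop := ∀ (markers : List (Int × String × String)) (chunk_start : Int), Dom_get_chunk_structure markers chunk_start → Spec_get_chunk_structure markers chunk_start (get_chunk_structure markers chunk_start)

-- ===== LEMMAS AND PROOFS =====

-- A's loop is the fold of its body over the prefix of markers with pos <= chunk_start
lemma pvGoA_eq_foldl (cs : Int) (markers : List (Int × String × String)) :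
    ∀ s, pvGoA cs markers s =
      (markers.takeWhile (fun x => decide (x.1 ≤ cs))).foldl pvStepA s := by
  induction markers with
  | nil => intro s; simp [pvGoA]
  | cons x rest ih =>
    intro s
    by_cases hp : x.1 > cs
    · have h1 : (decide (x.1 ≤ cs)) = false := by simp; omega
      simp [pvGoA, hp, h1]
    · have h1 : (decide (x.1 ≤ cs)) = true := by simp; omega
      simp [pvGoA, hp, h1, ih]

-- B's cutoff prefix is that same prefix
lemma take_pvCut (cs : Int) (markers : List (Int × String × String)) :
    markers.take (pvCut cs markers) = markers.takeWhile (fun x => decide (x.1 ≤ cs)) := by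
  induction markers with
  | nil => simp [pvCut]
  | cons x rest ih =>
    by_cases hp : x.1 ≤ cs
    · simp [pvCut, hp, ih]
    · simp [pvCut, hp]

-- value of the first 'tome' in a list, default t
def pvFT : List (Int × String × String) → String → String
  | [], t => t
  | x :: rest, t => if x.2.1 == "tome" then x.2.2 else pvFT rest t

lemma pvFT_append (m : List (Int × String × String)) (x : Int × String × String) (t : String) :
    pvFT (m ++ [x]) t = pvFT m (if x.2.1 == "tome" then x.2.2 else t) := by
  induction m with
  | nil => simp [pvFT]
  | cons y rest ih =>
    by_cases h : y.2.1 = "tome" <;> simp [pvFT, h, ih]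

lemma pvStepA_fst (s : String × String × String × String) (x : Int × String × String) :
    (pvStepA s x).1 = if x.2.1 == "tome" then x.2.2 else s.1 := by
  by_cases h1 : x.2.1 = "tome"
  · simp [pvStepA, h1]
  · by_cases h2 : x.2.1 = "part"
    · simp [pvStepA, h2]
    · by_cases h3 : x.2.1 = "chapter" <;> simp [pvStepA, h1, h2, h3]

-- tome component of A's fold = first 'tome' of the reversed list
lemma foldl_fst (l : List (Int × String × String)) :
    ∀ s, (List.foldl pvStepA s l).1 = pvFT l.reverse s.1 := by
  induction l with
  | nil => intro s; simp [pvFT]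
  | cons x rest ih =>
    intro s
    have : (x :: rest).reverse = rest.reverse ++ [x] := by simp
    rw [List.foldl_cons, ih, this, pvFT_append, pvStepA_fst]

-- once seen_part is set, B's loop only resolves the tome
lemma pvGoB_sp (l : List (Int × String × String)) :
    ∀ s sce, pvGoB l s true sce = (pvFT l s.1, s.2.1, s.2.2.1, s.2.2.2) := by
  induction l with
  | nil => intro s sce; simp [pvGoB, pvFT]
  | cons x rest ih =>
    intro s sce
    by_cases h1 : x.2.1 = "tome"
    · simp [pvGoB, pvFT, h1]
    · by_cases h2 : x.2.1 = "part"
      · simp [pvGoB, pvFT, h2, ih]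
      · by_cases h3 : x.2.1 = "chapter" <;> simp [pvGoB, pvFT, h1, h2, h3, ih]

-- once seen_chap_epi is set, B's loop only resolves tome and part
lemma pvGoB_sce (l : List (Int × String × String)) :
    ∀ c e, pvGoB l.reverse ("", "", c, e) false true =
      ((List.foldl pvStepA ("", "", "", "") l).1, (List.foldl pvStepA ("", "", "", "") l).2.1, c, e) := by
  induction l using List.reverseRecOn with
  | nil => intro c e; simp [pvGoB]
  | append_singleton l x ih =>
    intro c e
    have hrev : (l ++ [x]).reverse = x :: l.reverse := by simp
    rw [hrev]
    by_cases h1 : x.2.1 = "tome"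
    · simp [pvGoB, h1, List.foldl_append, pvStepA]
    · by_cases h2 : x.2.1 = "part"
      · simp [pvGoB, h2, pvGoB_sp, List.foldl_append, pvStepA, foldl_fst]
      · by_cases h3 : x.2.1 = "chapter" <;>
          simp [pvGoB, h1, h2, h3, ih, List.foldl_append, pvStepA]

-- main invariant: B's backward scan of a list computes A's fold over it
lemma pvGoB_main (l : List (Int × String × String)) :
    pvGoB l.reverse ("", "", "", "") false false = List.foldl pvStepA ("", "", "", "") l := by
  induction l using List.reverseRecOn with
  | nil => simp [pvGoB]
  | append_singleton l x ih =>
    have hrev : (l ++ [x]).reverse = x :: l.reverse := by simp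
    rw [hrev]
    by_cases h1 : x.2.1 = "tome"
    · simp [pvGoB, h1, List.foldl_append, pvStepA]
    · by_cases h2 : x.2.1 = "part"
      · simp [pvGoB, h2, pvGoB_sp, List.foldl_append, pvStepA, foldl_fst]
      · by_cases h3 : x.2.1 = "chapter"
        · simp [pvGoB, h3, pvGoB_sce, List.foldl_append, pvStepA]
        · simp [pvGoB, h1, h2, h3, pvGoB_sce, List.foldl_append, pvStepA]

-- ===== VERDICT (by name: the statement is the Claim_ definition above) =====
theorem get_chunk_structure_spec : Claim_equal_get_chunk_structure := by
  intro markers cs _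
  unfold Spec_get_chunk_structure get_chunk_structure get_chunk_structure_alt
  rw [take_pvCut, pvGoB_main, pvGoA_eq_foldl]
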